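-- pv_equiv track=rewrite | github.com/a1deas/asset-companion | backend/asset_companion/size_utils.py | round_to_power_of_two
-- ===== SOURCE A (Python) =====
-- def round_to_power_of_two(value: int) -> int:
--     """
--     Round value to nearest power of 2.
--
--     Args:
--         value: Input value
--
--     Returns:
--         Nearest power of 2
--     """
--     if value <= 0:
--         return 1
--     # Find nearest power of 2
--     power = 1
--     while power < value:
--         power <<= 1
--     # Choose closer: power or power // 2
--     if power - value < value - (power // 2):
--         return power
--     else:
--         return power // 2 if power // 2 > 0 else 1
-- ===== SOURCE B (Python) =====
-- def round_to_power_of_two(value: int) -> int: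
--     """Round value to nearest power of 2 (ties go to the smaller power)."""
--     if value <= 0:
--         return 1
--     high = 1 << (value - 1).bit_length()
--     low = high >> 1
--     if high - value < value - low:
--         return high
--     return low if low > 0 else 1
-- ===== Notes on version B (the rewrite author's own statement) =====
-- stated objective: idiomatic
-- what changed: Replaces the doubling while-loop with a direct bit_length computation of the bounding power of two, keeping the same distance comparison and tie-break.
import Mathlib
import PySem

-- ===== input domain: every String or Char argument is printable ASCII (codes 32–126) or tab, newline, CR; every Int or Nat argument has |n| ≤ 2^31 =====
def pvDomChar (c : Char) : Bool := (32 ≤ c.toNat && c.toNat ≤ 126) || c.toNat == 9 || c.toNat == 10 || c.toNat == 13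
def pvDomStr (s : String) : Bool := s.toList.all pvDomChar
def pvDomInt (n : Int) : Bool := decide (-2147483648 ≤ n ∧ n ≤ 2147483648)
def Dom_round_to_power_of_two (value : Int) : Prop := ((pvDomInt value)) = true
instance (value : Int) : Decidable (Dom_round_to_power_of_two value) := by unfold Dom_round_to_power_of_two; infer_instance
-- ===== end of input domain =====

-- B replaces A's doubling while-loop by a direct bit_length computation of the bounding power of two (idiomatic).

-- ===== PORT A =====
-- the `while power < value: power <<= 1` loop; the invariant 0 < power justifies termination
def pvLoopA (value power : Int) (h : 0 < power) : Int :=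
  if hlt : power < value then pvLoopA value (2 * power) (by omega) else power
termination_by (value - power).toNat
decreasing_by omega

def round_to_power_of_two (value : Int) : Int :=
  if value ≤ 0 then 1
  else
    let power := pvLoopA value 1 (by norm_num)
    -- `power // 2` on a positive int: Lean's `/` agrees with Python's `//` for positive divisor & dividend
    if power - value < value - power / 2 then power
    else if power / 2 > 0 then power / 2 else 1

-- ===== PORT B =====
-- port of Python's int.bit_length for nonnegative ints
def pvBitLen (n : Nat) : Nat :=
  if n = 0 then 0 else pvBitLen (n / 2) + 1

def round_to_power_of_two_alt (value : Int) : Int :=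
  if value ≤ 0 then 1
  else
    let high : Int := 2 ^ pvBitLen (value - 1).toNat   -- 1 << (value-1).bit_length()
    let low : Int := high / 2                          -- high >> 1, exact since high is a positive power of two
    if high - value < value - low then high
    else if low > 0 then low else 1

-- ===== PRECONDITION & SPEC =====
def Spec_round_to_power_of_two (value : Int) (out : Int) : Prop := out = round_to_power_of_two_alt value
instance (value : Int) (out : Int) : Decidable (Spec_round_to_power_of_two value out) := by unfold Spec_round_to_power_of_two; infer_instance

-- ===== CLAIM (what is proved, stated in full; the proofs are below) =====
def Claim_equal_round_to_power_of_two : Prop := ∀ (value : Int), Dom_round_to_power_of_two value → Spec_round_to_power_of_two value (round_to_power_of_two value)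

-- ===== LEMMAS AND PROOFS =====

lemma pvLoopA_congr (value p p' : Int) (h : 0 < p) (h' : 0 < p') (e : p = p') :
    pvLoopA value p h = pvLoopA value p' h' := by subst e; rfl

-- n < 2 ^ pvBitLen n
lemma pvBitLen_lt (n : Nat) : n < 2 ^ pvBitLen n := by
  induction n using Nat.strong_induction_on with
  | _ n ih =>
    rw [pvBitLen]
    by_cases h : n = 0
    · simp [h]
    · have := ih (n / 2) (by omega)
      simp only [h, if_false, pow_succ]
      omega

lemma pvBitLen_pos (n : Nat) (h : 1 ≤ n) : 1 ≤ pvBitLen n := by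
  rw [pvBitLen, if_neg (by omega)]; omega

-- 1 ≤ n → 2 ^ (pvBitLen n - 1) ≤ n
lemma pvBitLen_le (n : Nat) (h : 1 ≤ n) : 2 ^ (pvBitLen n - 1) ≤ n := by
  induction n using Nat.strong_induction_on with
  | _ n ih =>
    rw [pvBitLen]
    have h0 : n ≠ 0 := by omega
    simp only [h0, if_false, Nat.add_sub_cancel]
    by_cases h2 : n / 2 = 0
    · rw [pvBitLen, if_pos h2]; simpa using by omega
    · have hp := pvBitLen_pos (n / 2) (by omega)
      have := ih (n / 2) (by omega) (by omega)
      calc 2 ^ pvBitLen (n / 2) = 2 * 2 ^ (pvBitLen (n / 2) - 1) := by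
              rw [← pow_succ']; congr 1; omega
        _ ≤ 2 * (n / 2) := by omega
        _ ≤ n := by omega

-- the loop reaches 2^(k+d) if value ≤ 2^(k+d) and all intermediate powers are < value
lemma pvLoopA_eq (d : Nat) : ∀ (k : Nat) (value : Int) (h : (0:Int) < 2 ^ k),
    value ≤ 2 ^ (k + d) → (∀ j : Nat, k ≤ j → j < k + d → (2:Int) ^ j < value) →
    pvLoopA value (2 ^ k) h = 2 ^ (k + d) := by
  induction d with
  | zero =>
    intro k value h hle _
    rw [pvLoopA]
    simp only [Nat.add_zero] at hle ⊢
    rw [dif_neg (by omega)]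
  | succ d ih =>
    intro k value h hle hlt
    rw [pvLoopA]
    rw [dif_pos (hlt k le_rfl (by omega))]
    have e : (2:Int) * 2 ^ k = 2 ^ (k + 1) := by rw [pow_succ]; ring
    rw [pvLoopA_congr value (2 * 2 ^ k) (2 ^ (k + 1)) (by positivity) (by positivity) e]
    have := ih (k + 1) value (by positivity)
      (by rw [show k + 1 + d = k + (d + 1) by omega]; exact hle)
      (by intro j h1 h2; exact hlt j (by omega) (by omega))
    rw [this]; congr 1; omega

-- for 1 ≤ value the loop computes 2 ^ bit_length (value - 1)
lemma pvLoopA_bitLen (value : Int) (hv : 1 ≤ value) :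
    pvLoopA value 1 (by norm_num) = 2 ^ pvBitLen (value - 1).toNat := by
  set L := pvBitLen (value - 1).toNat with hL
  have hub : value ≤ 2 ^ L := by
    have := pvBitLen_lt (value - 1).toNat
    have h2 : ((value - 1).toNat : Int) < (2 : Int) ^ L := by exact_mod_cast this
    rw [Int.toNat_of_nonneg (by omega)] at h2
    omega
  have hlow : ∀ j : Nat, j < L → (2:Int) ^ j < value := by
    intro j hj
    have h1 : 1 ≤ (value - 1).toNat := by
      by_contra h
      have : (value - 1).toNat = 0 := by omega
      have : L = 0 := by rw [hL, this, pvBitLen]; simp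
      omega
    have := pvBitLen_le (value - 1).toNat h1
    have h2 : (2:Int) ^ (L - 1) ≤ value - 1 := by
      have h3 : ((2:Nat) ^ (L - 1) : Int) ≤ ((value - 1).toNat : Int) := by exact_mod_cast this
      rw [Int.toNat_of_nonneg (by omega)] at h3
      exact_mod_cast h3
    have hmono : (2:Int) ^ j ≤ 2 ^ (L - 1) := by
      apply pow_le_pow_right₀ (by norm_num); omega
    omega
  have h0 : (1:Int) = 2 ^ (0:Nat) := by norm_num
  rw [pvLoopA_congr value 1 (2 ^ (0:Nat)) (by norm_num) (by norm_num) h0]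
  have := pvLoopA_eq L 0 value (by norm_num) (by simpa using hub)
    (by intro j _ hj; exact hlow j (by simpa using hj))
  simpa using this

-- ===== VERDICT (by name: the statement is the Claim_ definition above) =====
theorem round_to_power_of_two_spec : Claim_equal_round_to_power_of_two := by
  intro value _
  unfold Spec_round_to_power_of_two round_to_power_of_two round_to_power_of_two_alt
  by_cases hv : value ≤ 0
  · simp [hv]
  · rw [if_neg hv, if_neg hv]
    rw [pvLoopA_bitLen value (by omega)]
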